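-- pv_equiv track=rewrite | github.com/Vedant9500/OpenLMlib | openlmlib/packing.py | _interleave_ends
-- ===== SOURCE A (Python) =====
-- from typing import Any, Dict, Iterable, List, Optional
--
-- def _interleave_ends(items: List[Any]) -> List[Any]:
--     """Reorder items so highest-score items are at the beginning and end.
--
--     Implements the "Lost in the Middle" position-aware ranking:
--     - Take the top-scored item → put at position 0
--     - Take the next top-scored item → put at the last position
--     - Take the next → put at position 1
--     - Take the next → put at second-to-last position
--     - Continue until all items are placed
--
--     For small lists (< 4 items), returns as-is since position effects are minimal.
--     """
--     if len(items) < 4: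
--         return list(items)
--
--     result: List[Any] = [None] * len(items)
--     left = 0
--     right = len(items) - 1
--
--     for i, item in enumerate(items):
--         if i % 2 == 0:
--             result[left] = item
--             left += 1
--         else:
--             result[right] = item
--             right -= 1
--
--         if left > right:
--             break
--
--     # Fill any remaining None slots (shouldn't happen, but safety)
--     remaining = [item for item in result if item is not None]
--     return remaining
-- ===== SOURCE B (Python) =====
-- from typing import Any, List
--
--
-- def _interleave_ends(items: List[Any]) -> List[Any]:
--     """Reorder items so highest-score items are at the beginning and end.
--
--     Elements at even positions form the front half in order; elements at odd
--     positions form the back half in reverse. Small lists (< 4) are returned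
--     as-is, matching the original.
--     """
--     if len(items) < 4:
--         return list(items)
--
--     front = []
--     back = []
--     i = 0
--     while i + 1 < len(items):
--         front.append(items[i])
--         back.append(items[i + 1])
--         i += 2
--     if i < len(items):
--         front.append(items[i])
--     back.reverse()
--     return front + back
-- ===== Notes on version B (the rewrite author's own statement) =====
-- stated objective: simpler
-- what changed: Replaces the preallocated None-filled array with two end pointers, a break and a trailing None-filter by a single pair-stepping pass that collects front/back halves into two lists and concatenates front with the reversed back.
import Mathlib
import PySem

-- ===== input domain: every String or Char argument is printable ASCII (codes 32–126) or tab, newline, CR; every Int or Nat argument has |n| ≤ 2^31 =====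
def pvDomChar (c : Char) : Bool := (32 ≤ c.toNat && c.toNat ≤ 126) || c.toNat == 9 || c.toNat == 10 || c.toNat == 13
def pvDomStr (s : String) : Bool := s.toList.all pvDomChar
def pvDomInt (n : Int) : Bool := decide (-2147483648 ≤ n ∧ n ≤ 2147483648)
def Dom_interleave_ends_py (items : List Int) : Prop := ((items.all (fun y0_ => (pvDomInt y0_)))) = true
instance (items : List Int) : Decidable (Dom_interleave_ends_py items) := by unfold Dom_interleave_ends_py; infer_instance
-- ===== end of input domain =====

-- B replaces A's preallocated None-array with two end pointers, break and None-filter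
-- by one pair-stepping pass collecting front/back lists, concatenated with back reversed (objective: simpler).


-- ===== PORT A =====
-- 'for i, item in enumerate(items): … if left > right: break' as structural recursion
-- over the remaining items, carrying i, result, left, right; branches in source order.
def loopA_interleave : List Int → Nat → List (Option Int) → Int → Int → List (Option Int)
  | [], _, res, _, _ => res
  | item :: rest, i, res, left, right =>
    if i % 2 = 0 then
      let res' := PySem.List.pySetD res left (some item)
      let left' := left + 1
      if left' > right then res' else loopA_interleave rest (i + 1) res' left' right
    else
      let res' := PySem.List.pySetD res right (some item)
      let right' := right - 1
      if left > right' then res' else loopA_interleave rest (i + 1) res' left right'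

def interleave_ends_py (items : List Int) : List Int :=
  if items.length < 4 then items
  else
    -- result = [None] * len(items); final '[item for item in result if item is not None]'
    -- is filterMap id (drop the Nones, keep the values) — exact for Option Int slots.
    (loopA_interleave items 0 (List.replicate items.length (none : Option Int))
        0 ((items.length : Int) - 1)).filterMap id

-- ===== PORT B =====
-- 'while i + 1 < len(items): front.append(items[i]); back.append(items[i+1]); i += 2'
-- plus the trailing 'if i < len(items)' is the obvious two-at-a-time structural recursion.
def loopB_interleave : List Int → List Int → List Int → List Int × List Int
  | x :: y :: rest, front, back => loopB_interleave rest (front ++ [x]) (back ++ [y])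
  | [x], front, back => (front ++ [x], back)
  | [], front, back => (front, back)

def interleave_ends_py_alt (items : List Int) : List Int :=
  if items.length < 4 then items
  else
    let fb := loopB_interleave items [] []
    fb.1 ++ fb.2.reverse

-- ===== PRECONDITION & SPEC =====
def Spec_interleave_ends_py (items : List Int) (out : List Int) : Prop := out = interleave_ends_py_alt items
instance (items : List Int) (out : List Int) : Decidable (Spec_interleave_ends_py items out) := by unfold Spec_interleave_ends_py; infer_instance

-- ===== CLAIM (what is proved, stated in full; the proofs are below) =====
def Claim_equal_interleave_ends_py : Prop := ∀ (items : List Int), Dom_interleave_ends_py items → Spec_interleave_ends_py items (interleave_ends_py items)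

-- ===== LEMMAS AND PROOFS =====

-- setting the first None slot
lemma pv_set_left (A : List (Option Int)) (k : Nat) (Bs : List (Option Int)) (x : Int) :
    (A ++ (List.replicate (k + 1) (none : Option Int) ++ Bs)).set A.length (some x)
      = A ++ (some x :: (List.replicate k (none : Option Int) ++ Bs)) := by
  induction A with
  | nil => simp [List.replicate_succ]
  | cons a A ih => simpa using ih

-- setting the last None slot
lemma pv_set_repl (k : Nat) (Bs : List (Option Int)) (x : Int) :
    (List.replicate (k + 1) (none : Option Int) ++ Bs).set k (some x)
      = List.replicate k (none : Option Int) ++ (some x :: Bs) := by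
  induction k with
  | zero => simp [List.replicate_succ]
  | succ k ih =>
    rw [List.replicate_succ]
    simpa [List.replicate_succ] using ih

lemma pv_set_right (A : List (Option Int)) (k : Nat) (Bs : List (Option Int)) (x : Int) :
    (A ++ (List.replicate (k + 1) (none : Option Int) ++ Bs)).set (A.length + k) (some x)
      = A ++ (List.replicate k (none : Option Int) ++ (some x :: Bs)) := by
  induction A with
  | nil => simpa using pv_set_repl k Bs x
  | cons a A ih => simpa [Nat.succ_add] using ih

-- accumulator lemma for B's loop
lemma loopB_acc : ∀ (rest f b : List Int),
    loopB_interleave rest f b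
      = (f ++ (loopB_interleave rest [] []).1, b ++ (loopB_interleave rest [] []).2)
  | [], f, b => by simp [loopB_interleave]
  | [x], f, b => by simp [loopB_interleave]
  | x :: y :: r, f, b => by
    show loopB_interleave r (f ++ [x]) (b ++ [y]) = _
    rw [loopB_acc r (f ++ [x]) (b ++ [y])]
    show _ = (f ++ (loopB_interleave r [x] [y]).1, b ++ (loopB_interleave r [x] [y]).2)
    rw [loopB_acc r [x] [y]]
    simp

-- main invariant: A's loop fills the None window with B's weave of the remaining items
lemma loopA_inv : ∀ (rest A B : List Int), rest ≠ [] → (A.length + B.length) % 2 = 0 →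
    loopA_interleave rest (A.length + B.length)
        (A.map some ++ (List.replicate rest.length (none : Option Int) ++ B.map some))
        (A.length : Int) ((A.length : Int) + (rest.length : Int) - 1)
      = A.map some ++ (((loopB_interleave rest [] []).1
          ++ (loopB_interleave rest [] []).2.reverse).map some ++ B.map some)
  | [], _, _, h, _ => absurd rfl h
  | [x], A, B, _, hpar => by
    rw [loopA_interleave]
    rw [if_pos hpar]
    have hset : PySem.List.pySetD
        (A.map some ++ (List.replicate ([x] : List Int).length (none : Option Int) ++ B.map some))
        (A.length : Int) (some x)
        = A.map some ++ (some x :: B.map some) := by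
      rw [PySem.List.pySetD_natCast]
      have := pv_set_left (A.map some) 0 (B.map some) x
      simpa using this
    simp only [hset]
    have hbr : ((A.length : Int) + 1 > (A.length : Int) + (([x] : List Int).length : Int) - 1) := by
      simp only [List.length_cons, List.length_nil, List.length_append, List.length_map]; push_cast; omega
    rw [if_pos hbr]
    simp [loopB_interleave]
  | x :: y :: r, A, B, _, hpar => by
    rw [loopA_interleave]
    rw [if_pos hpar]
    -- step 1: place x at 'left'
    have hset1 : PySem.List.pySetD
        (A.map some ++ (List.replicate (x :: y :: r).length (none : Option Int) ++ B.map some))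
        (A.length : Int) (some x)
        = (A ++ [x]).map some ++ (List.replicate (r.length + 1) (none : Option Int) ++ B.map some) := by
      rw [PySem.List.pySetD_natCast]
      have := pv_set_left (A.map some) (r.length + 1) (B.map some) x
      simp only [List.length_cons, List.length_map] at this ⊢
      rw [show r.length + 1 + 1 = r.length + 1 + 1 from rfl] at this
      rw [this]
      simp
    have hnb1 : ¬ ((A.length : Int) + 1 > (A.length : Int) + ((x :: y :: r).length : Int) - 1) := by
      simp only [List.length_cons, List.length_nil, List.length_append, List.length_map]; push_cast; omega
    simp only [hset1, if_neg hnb1]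
    -- step 2: place y at 'right'
    rw [loopA_interleave]
    have hodd : ¬ ((A.length + B.length + 1) % 2 = 0) := by omega
    rw [if_neg hodd]
    have hidx : (A.length : Int) + ((x :: y :: r).length : Int) - 1
        = (((A ++ [x]).map (some (α := Int))).length + r.length : Nat) := by
      simp only [List.length_cons, List.length_nil, List.length_append, List.length_map]; push_cast; omega
    have hset2 : PySem.List.pySetD
        ((A ++ [x]).map some ++ (List.replicate (r.length + 1) (none : Option Int) ++ B.map some))
        ((A.length : Int) + ((x :: y :: r).length : Int) - 1) (some y)
        = (A ++ [x]).map some ++ (List.replicate r.length (none : Option Int) ++ (y :: B).map some) := by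
      rw [hidx, PySem.List.pySetD_natCast]
      have := pv_set_right ((A ++ [x]).map some) r.length (B.map some) y
      simpa using this
    simp only [hset2]
    have hBsplit := loopB_acc r [x] [y]
    rcases hr : r with _ | ⟨z, r'⟩
    · -- r = []: the loop breaks
      have hbr : ((A.length : Int) + 1 > (A.length : Int) + ((x :: y :: ([] : List Int)).length : Int) - 1 - 1) := by
        simp only [List.length_cons, List.length_nil, List.length_append, List.length_map]
        push_cast; omega
      rw [if_pos hbr]
      simp [loopB_interleave]
    · -- r ≠ []: recurse
      have hnb2 : ¬ ((A.length : Int) + 1 > (A.length : Int) + ((x :: y :: z :: r').length : Int) - 1 - 1) := by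
        simp only [List.length_cons, List.length_nil, List.length_append, List.length_map]
        push_cast; omega
      rw [if_neg hnb2]
      have hlen : (A.length + B.length + 1 + 1) = ((A ++ [x]).length + (y :: B).length) := by
        simp; omega
      have hl : (A.length : Int) + 1 = (((A ++ [x]).length : Nat) : Int) := by
        simp only [List.length_cons, List.length_nil, List.length_append, List.length_map]
        push_cast; omega
      have hrr : (A.length : Int) + ((x :: y :: z :: r').length : Int) - 1 - 1
          = (((A ++ [x]).length : Nat) : Int) + ((z :: r').length : Int) - 1 := by
        simp only [List.length_cons, List.length_nil, List.length_append, List.length_map]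
        push_cast; omega
      rw [hlen, hl, hrr]
      have hrec := loopA_inv (z :: r') (A ++ [x]) (y :: B) (by simp)
        (by simp; omega)
      rw [hrec]
      have hB := loopB_acc (z :: r') [x] [y]
      show _ = A.map some ++ (((loopB_interleave (z :: r') [x] [y]).1
          ++ (loopB_interleave (z :: r') [x] [y]).2.reverse).map some ++ B.map some)
      rw [hB]
      simp

-- ===== VERDICT (by name: the statement is the Claim_ definition above) =====
theorem interleave_ends_py_spec : Claim_equal_interleave_ends_py := by
  intro items _
  unfold Spec_interleave_ends_py interleave_ends_py interleave_ends_py_alt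
  by_cases h : items.length < 4
  · simp [h]
  · rw [if_neg h, if_neg h]
    have hne : items ≠ [] := by
      intro he; rw [he] at h; simp at h
    have := loopA_inv items [] [] hne (by simp)
    simp only [List.map_nil, List.nil_append, List.append_nil, List.length_nil,
      Nat.cast_zero, Nat.add_zero, zero_add] at this
    rw [this]
    simp [List.filterMap_map]
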